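-- pv_equiv track=rewrite | github.com/iliyaswhtee/wht.3 | function1/8.py | spy_game
-- ===== SOURCE A (Python) =====
-- def spy_game(nums):
--     code = [0, 0, 7]  # The sequence to check for
--     index = 0  # Index to keep track of the current element in the sequence
--
--     for num in nums:
--         if num == code[index]:
--             index += 1
--             if index == len(code):
--                 return True
--
--     return False
-- ===== SOURCE B (Python) =====
-- def spy_game(nums):
--     # A 0,0,7 subsequence exists iff the LAST 7 has at least two zeros before it.
--     if 7 not in nums:
--         return False
--     last7 = len(nums) - 1 - nums[::-1].index(7)
--     return nums[:last7].count(0) >= 2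
-- ===== Notes on version B (the rewrite author's own statement) =====
-- stated objective: alternative
-- what changed: Replaced the incremental pattern-matching state machine with a counting formulation: locate the last 7 (via a reversed index) and test whether at least two zeros occur before it.
import Mathlib
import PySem

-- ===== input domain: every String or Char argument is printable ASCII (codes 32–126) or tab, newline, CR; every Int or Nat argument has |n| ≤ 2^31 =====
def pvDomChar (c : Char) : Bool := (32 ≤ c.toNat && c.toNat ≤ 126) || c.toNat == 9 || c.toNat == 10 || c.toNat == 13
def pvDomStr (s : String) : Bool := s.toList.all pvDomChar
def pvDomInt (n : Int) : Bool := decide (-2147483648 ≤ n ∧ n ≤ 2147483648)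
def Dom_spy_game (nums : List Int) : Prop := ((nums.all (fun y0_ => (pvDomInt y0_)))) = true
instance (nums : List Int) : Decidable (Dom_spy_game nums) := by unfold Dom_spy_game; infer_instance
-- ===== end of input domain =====

-- B replaces A's incremental pattern-matching state machine with a counting formulation:
-- find the last 7 and test whether at least two zeros occur before it (alternative; same cost).

-- ===== PORT A =====
-- A's code list [0, 0, 7]
def spyCode : List Int := [0, 0, 7]

-- A's for-loop: carries `index`, compares num with code[index], early-returns True when index reaches len(code)
def spyLoopA : List Int → Nat → Bool
  | [], _ => false
  | num :: rest, index =>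
    if some num = PySem.List.pyGet? spyCode (Int.ofNat index) then
      (if index + 1 = spyCode.length then true else spyLoopA rest (index + 1))
    else spyLoopA rest index

def spy_game (nums : List Int) : Bool := spyLoopA nums 0

-- ===== PORT B =====
-- Source B: `7 not in nums` → membership; `nums[::-1]` → List.reverse (exact for step -1 full slice);
-- `.index(7)` → PySem.List.index? (some, guarded by the membership test); `nums[:last7]` → slice; `.count(0)` → count
def spy_game_alt (nums : List Int) : Bool :=
  if 7 ∈ nums then
    match PySem.List.index? nums.reverse 7 with
    | some r =>
      decide (2 ≤ PySem.List.count (PySem.List.slice nums none (some ((nums.length : Int) - 1 - (r : Int)))) 0)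
    | none => false
  else false

-- ===== PRECONDITION & SPEC =====
def Spec_spy_game (nums : List Int) (out : Bool) : Prop := out = spy_game_alt nums
instance (nums : List Int) (out : Bool) : Decidable (Spec_spy_game nums out) := by unfold Spec_spy_game; infer_instance

-- ===== CLAIM (what is proved, stated in full; the proofs are below) =====
def Claim_equal_spy_game : Prop := ∀ (nums : List Int), Dom_spy_game nums → Spec_spy_game nums (spy_game nums)

-- ===== LEMMAS AND PROOFS =====

-- Both programs decide the same property: some prefix before a 7 contains at least two zeros.
def SpyKey (l : List Int) : Prop := ∃ p s, l = p ++ 7 :: s ∧ 2 ≤ p.count 0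

theorem spyA2 (l : List Int) : spyLoopA l 2 = true ↔ 7 ∈ l := by
  induction l with
  | nil => simp [spyLoopA]
  | cons a t ih =>
    by_cases h : a = (7 : Int)
    · simp [spyLoopA, spyCode, PySem.List.pyGet?, PySem.List.pyIdx?, h]
    · simp only [spyLoopA, spyCode, PySem.List.pyGet?, PySem.List.pyIdx?]
      simp [h, ih]
      exact fun h' => absurd h'.symm h

theorem spyA1 (l : List Int) : spyLoopA l 1 = true ↔ ∃ p s, l = p ++ 0 :: s ∧ 7 ∈ s := by
  induction l with
  | nil =>
    simp only [spyLoopA]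
    constructor
    · intro h; cases h
    · rintro ⟨p, s, h, -⟩; exact absurd h (by simp)
  | cons a t ih =>
    by_cases h : a = (0 : Int)
    · subst h
      have hstep : spyLoopA (0 :: t) 1 = spyLoopA t 2 := by
        simp [spyLoopA, spyCode, PySem.List.pyGet?, PySem.List.pyIdx?]
      rw [hstep, spyA2]
      constructor
      · intro h7; exact ⟨[], t, rfl, h7⟩
      · rintro ⟨p, s, hps, h7⟩
        cases p with
        | nil =>
          rw [List.nil_append] at hps
          injection hps with _ h2
          subst h2; exact h7
        | cons x p' =>
          rw [List.cons_append] at hps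
          injection hps with _ h2
          subst h2
          simp [h7]
    · have hstep : spyLoopA (a :: t) 1 = spyLoopA t 1 := by
        simp [spyLoopA, spyCode, PySem.List.pyGet?, PySem.List.pyIdx?, h]
      rw [hstep, ih]
      constructor
      · rintro ⟨p, s, hps, h7⟩; exact ⟨a :: p, s, by simp [hps], h7⟩
      · rintro ⟨p, s, hps, h7⟩
        cases p with
        | nil =>
          rw [List.nil_append] at hps
          injection hps with h1 _
          exact absurd h1 h
        | cons x p' =>
          rw [List.cons_append] at hps
          injection hps with _ h2
          exact ⟨p', s, h2, h7⟩

theorem spyA0 (l : List Int) :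
    spyLoopA l 0 = true ↔ ∃ p s, l = p ++ 0 :: s ∧ ∃ q u, s = q ++ 0 :: u ∧ 7 ∈ u := by
  induction l with
  | nil =>
    simp only [spyLoopA]
    constructor
    · intro h; cases h
    · rintro ⟨p, s, h, -⟩; exact absurd h (by simp)
  | cons a t ih =>
    by_cases h : a = (0 : Int)
    · subst h
      have hstep : spyLoopA (0 :: t) 0 = spyLoopA t 1 := by
        simp [spyLoopA, spyCode, PySem.List.pyGet?, PySem.List.pyIdx?]
      rw [hstep, spyA1]
      constructor
      · rintro ⟨q, u, hqu, h7⟩; exact ⟨[], t, rfl, q, u, hqu, h7⟩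
      · rintro ⟨p, s, hps, q, u, hqu, h7⟩
        cases p with
        | nil =>
          rw [List.nil_append] at hps
          injection hps with _ h2
          subst h2
          exact ⟨q, u, hqu, h7⟩
        | cons x p' =>
          rw [List.cons_append] at hps
          injection hps with _ h2
          subst h2
          -- t = p' ++ 0 :: (q ++ 0 :: u) with 7 ∈ u : exhibit the SECOND zero for stage 1
          exact ⟨p' ++ 0 :: q, u, by simp [hqu], h7⟩
    · have hstep : spyLoopA (a :: t) 0 = spyLoopA t 0 := by
        simp [spyLoopA, spyCode, PySem.List.pyGet?, PySem.List.pyIdx?, h]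
      rw [hstep, ih]
      constructor
      · rintro ⟨p, s, hps, hrest⟩; exact ⟨a :: p, s, by simp [hps], hrest⟩
      · rintro ⟨p, s, hps, hrest⟩
        cases p with
        | nil =>
          rw [List.nil_append] at hps
          injection hps with h1 _
          exact absurd h1 h
        | cons x p' =>
          rw [List.cons_append] at hps
          injection hps with _ h2
          exact ⟨p', s, h2, hrest⟩

theorem spy_two_zeros {p : List Int} (h : 2 ≤ p.count 0) :
    ∃ a b c, p = a ++ 0 :: b ++ 0 :: c := by
  induction p with
  | nil => simp at h
  | cons x t ih =>
    by_cases hx : x = (0 : Int)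
    · subst hx
      rw [List.count_cons_self] at h
      have h1 : 1 ≤ t.count 0 := by omega
      have hmem : (0 : Int) ∈ t := by
        by_contra hm
        simp [List.count_eq_zero_of_not_mem hm] at h1
      obtain ⟨b, c, hbc⟩ := List.append_of_mem hmem
      exact ⟨[], b, c, by simp [hbc]⟩
    · rw [List.count_cons_of_ne hx] at h
      obtain ⟨a, b, c, habc⟩ := ih h
      exact ⟨x :: a, b, c, by simp [habc]⟩

theorem spyA_key (l : List Int) : spy_game l = true ↔ SpyKey l := by
  rw [spy_game, spyA0]
  constructor
  · rintro ⟨p, s, hps, q, u, hqu, h7⟩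
    obtain ⟨x, y, hxy⟩ := List.append_of_mem h7
    refine ⟨p ++ 0 :: q ++ 0 :: x, y, ?_, ?_⟩
    · simp [hps, hqu, hxy]
    · simp [List.count_append]; omega
  · rintro ⟨p, s, hps, hc⟩
    obtain ⟨a, b, c, habc⟩ := spy_two_zeros hc
    exact ⟨a, b ++ 0 :: (c ++ 7 :: s), by simp [hps, habc], b, c ++ 7 :: s, rfl, by simp⟩

-- if two decompositions before a 7 exist and the second 7 is the LAST one, the first prefix is at most as long
theorem spy_len_le {p s u v : List Int} (h : p ++ 7 :: s = u ++ 7 :: v) (hv : (7:Int) ∉ v) :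
    p.length ≤ u.length := by
  induction p generalizing u with
  | nil => simp
  | cons a p' ih =>
    cases u with
    | nil =>
      exfalso
      rw [List.nil_append, List.cons_append] at h
      injection h with _ h2
      exact hv (by simp [← h2])
    | cons b u' =>
      rw [List.cons_append, List.cons_append] at h
      injection h with _ h2
      simpa using Nat.succ_le_succ (ih h2)

theorem spyB_key (l : List Int) : spy_game_alt l = true ↔ SpyKey l := by
  unfold spy_game_alt
  by_cases hmem : (7 : Int) ∈ l
  · have hmemr : (7 : Int) ∈ l.reverse := by simpa using hmem
    obtain ⟨r, hr⟩ := Option.isSome_iff_exists.mp ((PySem.List.index?_isSome_iff _ _).mpr hmemr)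
    obtain ⟨pre, suf, hdecomp, hlen, hnot⟩ := (PySem.List.index?_eq_some_iff _ _ _).mp hr
    -- l = suf.reverse ++ 7 :: pre.reverse, with no 7 in pre.reverse (nothing after the last 7)
    have hl : l = suf.reverse ++ 7 :: pre.reverse := by
      rw [← List.reverse_reverse l, hdecomp]
      simp
    have hlenl : l.length = suf.length + 1 + r := by
      rw [hl]; simp [hlen]; omega
    have hslice : PySem.List.slice l none (some ((l.length : Int) - 1 - (r : Int))) = suf.reverse := by
      have hb : ((l.length : Int) - 1 - (r : Int)) = (suf.length : Int) := by
        rw [hlenl]; push_cast; ring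
      rw [hb, PySem.List.slice_to_natCast, hl]
      exact List.take_left' (by simp)
    rw [if_pos hmem, hr]
    simp only [hslice, PySem.List.count_eq, decide_eq_true_eq]
    have hnotrev : (7 : Int) ∉ pre.reverse := by simpa using hnot
    constructor
    · intro hc
      exact ⟨suf.reverse, pre.reverse, hl, hc⟩
    · rintro ⟨p, s, hps, hc⟩
      have heq : p ++ 7 :: s = suf.reverse ++ 7 :: pre.reverse := by rw [← hps, ← hl]
      have hle : p.length ≤ suf.reverse.length := spy_len_le heq hnotrev
      have hpfx : p <+: suf.reverse :=
        List.prefix_of_prefix_length_le ⟨7 :: s, heq⟩ ⟨7 :: pre.reverse, rfl⟩ hle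
      calc (2 : Nat) ≤ p.count 0 := hc
        _ ≤ suf.reverse.count 0 := hpfx.sublist.count_le 0
  · rw [if_neg hmem]
    constructor
    · intro h; cases h
    · rintro ⟨p, s, hps, -⟩
      exact absurd (by simp [hps] : (7:Int) ∈ l) hmem

-- ===== VERDICT (by name: the statement is the Claim_ definition above) =====
theorem spy_game_spec : Claim_equal_spy_game := by
  intro nums _
  unfold Spec_spy_game
  have hA := spyA_key nums
  have hB := spyB_key nums
  cases hA' : spy_game nums <;> cases hB' : spy_game_alt nums <;> simp_all
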